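-- pv_equiv track=rewrite | github.com/ynghan/Algorithm_BaekjoonAndProgrammers | 프로그래머스/1/12948. 핸드폰 번호 가리기/핸드폰 번호 가리기.py | solution
-- ===== SOURCE A (Python) =====
-- def solution(phone_number):
--     answer = []
--     for i in range(len(phone_number)):
--         if i < len(phone_number) - 4:
--             answer.append("*")
--         else:
--             answer.append(phone_number[i])
--     return ''.join(answer)
-- ===== SOURCE B (Python) =====
-- def solution(phone_number):
--     return "*" * (len(phone_number) - 4) + phone_number[-4:]
-- ===== Notes on version B (the rewrite author's own statement) =====
-- stated objective: idiomatic
-- what changed: Replaces the indexed loop with per-position branching by a closed-form concatenation of a repeated mask character and the last-four slice, relying on Python's negative-multiplier and slice semantics for short strings.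
import Mathlib
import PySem

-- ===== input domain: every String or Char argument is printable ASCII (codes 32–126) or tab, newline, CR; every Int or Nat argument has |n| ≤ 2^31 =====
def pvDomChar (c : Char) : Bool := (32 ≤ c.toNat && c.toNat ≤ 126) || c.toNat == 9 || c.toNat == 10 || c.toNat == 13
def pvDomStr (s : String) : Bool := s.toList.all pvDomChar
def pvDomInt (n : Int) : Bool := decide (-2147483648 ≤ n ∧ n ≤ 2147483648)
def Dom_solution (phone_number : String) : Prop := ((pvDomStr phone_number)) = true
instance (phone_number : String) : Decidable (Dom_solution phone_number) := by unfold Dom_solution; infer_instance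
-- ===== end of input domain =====

-- B replaces A's indexed loop with the closed form '*'*(len-4) + phone[-4:] (idiomatic, same cost).

-- ===== PORT A =====
-- loop over range(len), appending "*" or the i-th character; ''.join ported as String.ofList.
-- pyGetD's default is never used: i ranges over valid indices.
def solution (phone_number : String) : String :=
  let cs := phone_number.toList
  let n : Int := cs.length
  let answer : List Char :=
    (PySem.List.pyRange 0 n 1).foldl
      (fun acc i => if i < n - 4 then acc ++ ['*'] else acc ++ [PySem.List.pyGetD cs i ' ']) []
  String.ofList answer

-- ===== PORT B =====
-- '*' * (len - 4): negative multiplier gives '' = toNat of a negative Int; phone_number[-4:] is a PySem slice.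
def solution_alt (phone_number : String) : String :=
  let cs := phone_number.toList
  String.ofList (List.replicate ((cs.length : Int) - 4).toNat '*' ++ PySem.List.slice cs (some (-4)) none)

-- ===== PRECONDITION & SPEC =====
def Spec_solution (phone_number : String) (out : String) : Prop := out = solution_alt phone_number
instance (phone_number : String) (out : String) : Decidable (Spec_solution phone_number out) := by unfold Spec_solution; infer_instance

-- ===== CLAIM (what is proved, stated in full; the proofs are below) =====
def Claim_equal_solution : Prop := ∀ (phone_number : String), Dom_solution phone_number → Spec_solution phone_number (solution phone_number)

-- ===== LEMMAS AND PROOFS =====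

theorem mask_map_eq (cs : List Char) :
    (List.range cs.length).map
        (fun (k : Nat) => if (k : Int) < (cs.length : Int) - 4 then '*' else PySem.List.pyGetD cs (k : Int) ' ')
      = List.replicate ((cs.length : Int) - 4).toNat '*' ++ cs.drop (cs.length - 4) := by
  apply List.ext_getElem
  · simp; omega
  · intro j h1 h2
    simp only [List.getElem_map, List.getElem_range]
    by_cases hj : (j : Int) < (cs.length : Int) - 4
    · rw [if_pos hj, List.getElem_append_left (by simp; omega)]
      simp
    · rw [if_neg hj, List.getElem_append_right (by simp; omega)]
      have hjlen : j < cs.length := by simpa using h1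
      rw [PySem.List.pyGetD_natCast]
      simp only [List.getElem_drop, List.length_replicate]
      rw [List.getD_eq_getElem _ _ hjlen]
      congr 1
      omega

-- ===== VERDICT (by name: the statement is the Claim_ definition above) =====
theorem solution_spec : Claim_equal_solution := by
  intro s _
  unfold Spec_solution solution solution_alt
  simp only
  congr 1
  have hbody : (fun (acc : List Char) (i : Int) =>
      if i < (s.toList.length : Int) - 4 then acc ++ ['*'] else acc ++ [PySem.List.pyGetD s.toList i ' '])
      = fun acc i => acc ++ [if i < (s.toList.length : Int) - 4 then '*' else PySem.List.pyGetD s.toList i ' '] := by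
    funext acc i; split <;> rfl
  rw [hbody, PySem.List.foldl_append_singleton_eq_map, PySem.List.pyRange_one,
    PySem.List.slice_from_neg_ofNat _ 4 (by omega), List.map_map]
  simpa [Function.comp_def] using mask_map_eq s.toList
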